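-- pv_equiv track=rewrite | github.com/TamarAlshech1789/ColoringGraph | find_all_edges.py | same_vertices
-- ===== SOURCE A (Python) =====
-- def same_vertices(edges):
--     vertices = []
--     for edge in edges:
--         ver1 = edge[0]
--         ver2 = edge[1]
--         if ver1 in vertices or ver2 in vertices:
--             return False
--
--         vertices.append(ver1)
--         vertices.append(ver2)
--
--     return True
-- ===== SOURCE B (Python) =====
-- def same_vertices(edges):
--     ends = [{edge[0], edge[1]} for edge in edges]
--     for i in range(len(ends)):
--         for j in range(i + 1, len(ends)):
--             if ends[i] & ends[j]:
--                 return False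
--     return True
-- ===== Notes on version B (the rewrite author's own statement) =====
-- stated objective: alternative
-- what changed: Replaces A's incremental single-pass seen-vertices accumulation with an all-pairs disjointness test over per-edge endpoint sets.
-- outside the precondition, e.g. on same_vertices([(1, 2), (1, 3), (0,)]): A returns False, B raises IndexError
import Mathlib
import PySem

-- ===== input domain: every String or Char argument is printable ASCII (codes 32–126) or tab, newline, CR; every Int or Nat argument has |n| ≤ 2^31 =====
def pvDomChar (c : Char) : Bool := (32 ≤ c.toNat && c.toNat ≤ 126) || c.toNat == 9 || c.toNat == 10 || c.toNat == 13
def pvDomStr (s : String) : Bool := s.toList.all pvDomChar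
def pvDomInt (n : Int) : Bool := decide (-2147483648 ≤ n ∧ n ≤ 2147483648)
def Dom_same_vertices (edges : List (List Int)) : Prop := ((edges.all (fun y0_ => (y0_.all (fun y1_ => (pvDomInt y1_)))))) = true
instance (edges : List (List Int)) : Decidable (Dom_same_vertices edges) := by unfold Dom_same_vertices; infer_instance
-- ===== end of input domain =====

-- B replaces A's incremental seen-vertices accumulation by an all-pairs disjointness
-- test over per-edge endpoint sets (objective: alternative decomposition; return value only).

-- ===== PORT A =====
-- the 'for edge in edges' loop with the accumulating 'vertices' list
def same_verticesLoop : List (List Int) → List Int → Bool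
  | [], _ => true
  | edge :: rest, vertices =>
    match PySem.List.pyGet? edge 0, PySem.List.pyGet? edge 1 with
    | some ver1, some ver2 =>
      if vertices.contains ver1 || vertices.contains ver2 then false
      else same_verticesLoop rest (vertices ++ [ver1, ver2])
    | _, _ => false  -- IndexError in Python; excluded by Pre_

def same_vertices (edges : List (List Int)) : Bool :=
  same_verticesLoop edges []

-- ===== PORT B =====
-- 'for i … for j in range(i+1,…)': each edge's endpoint set checked against all later ones
def same_verticesAltLoop : List (PySem.Set Int) → Bool
  | [] => true
  | s :: rest =>
    if rest.any (fun t => !(PySem.Set.inter s t).isEmpty) then false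
    else same_verticesAltLoop rest

def same_vertices_alt (edges : List (List Int)) : Bool :=
  let ends := edges.map (fun edge =>
    PySem.Set.ofList [PySem.List.pyGetD edge 0 0, PySem.List.pyGetD edge 1 0])
  same_verticesAltLoop ends

-- ===== PRECONDITION & SPEC =====
-- Pre_ excludes inputs where some edge has fewer than two endpoints: there A raises
-- IndexError (and so does B), except that A may return False first when an earlier
-- conflict precedes the short edge — see the cite in claim.json.
def Pre_same_vertices (edges : List (List Int)) : Prop :=
  ∀ e ∈ edges, 2 ≤ e.length
instance (edges : List (List Int)) : Decidable (Pre_same_vertices edges) := by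
  unfold Pre_same_vertices; infer_instance

def pvWitness_same_vertices : List (List Int) := [[1, 2], [3, 3], [4, 5]]

def Spec_same_vertices (edges : List (List Int)) (out : Bool) : Prop := out = same_vertices_alt edges
instance (edges : List (List Int)) (out : Bool) : Decidable (Spec_same_vertices edges out) := by unfold Spec_same_vertices; infer_instance

-- ===== CLAIM (what is proved, stated in full; the proofs are below) =====
def Claim_equal_same_vertices : Prop := ∀ (edges : List (List Int)), Dom_same_vertices edges → Pre_same_vertices edges → Spec_same_vertices edges (same_vertices edges)

-- ===== LEMMAS AND PROOFS =====

-- endpoint pair of an edge, as B reads it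
def pvEnds (edge : List Int) : PySem.Set Int :=
  PySem.Set.ofList [PySem.List.pyGetD edge 0 0, PySem.List.pyGetD edge 1 0]

theorem pvEnds_mem (edge : List Int) (x : Int) :
    x ∈ pvEnds edge ↔ x = PySem.List.pyGetD edge 0 0 ∨ x = PySem.List.pyGetD edge 1 0 := by
  simp [pvEnds, PySem.Set.mem_ofList]

theorem pvInter_empty_iff (s t : PySem.Set Int) :
    (PySem.Set.inter s t).isEmpty = true ↔ ∀ x ∈ s, x ∉ t := by
  simp [PySem.Set.inter, List.isEmpty_iff, List.filter_eq_nil_iff]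

-- nonempty intersection of two endpoint sets, spelled with the endpoints
theorem pvInter_ne_iff (v1 v2 : Int) (tl : List Int) (f : List Int)
    (g0 : PySem.List.pyGetD (v1 :: v2 :: tl) (0 : Int) 0 = v1)
    (g1 : PySem.List.pyGetD (v1 :: v2 :: tl) (1 : Int) 0 = v2) :
    (PySem.Set.inter (pvEnds (v1 :: v2 :: tl)) (pvEnds f)).isEmpty = false ↔
      (PySem.List.pyGetD f 0 0 = v1 ∨ PySem.List.pyGetD f 0 0 = v2 ∨
       PySem.List.pyGetD f 1 0 = v1 ∨ PySem.List.pyGetD f 1 0 = v2) := by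
  rw [Bool.eq_false_iff, Ne, pvInter_empty_iff]
  push Not
  constructor
  · rintro ⟨x, hx, hxf⟩
    rcases (pvEnds_mem _ x).1 hx with h | h <;> rw [g0] at * <;> rw [g1] at * <;>
      rcases (pvEnds_mem f x).1 hxf with h' | h' <;> subst h <;> tauto
  · rintro (h | h | h | h)
    · exact ⟨v1, (pvEnds_mem _ _).2 (by rw [g0]; tauto), (pvEnds_mem f _).2 (by tauto)⟩
    · exact ⟨v2, (pvEnds_mem _ _).2 (by rw [g1]; tauto), (pvEnds_mem f _).2 (by tauto)⟩
    · exact ⟨v1, (pvEnds_mem _ _).2 (by rw [g0]; tauto), (pvEnds_mem f _).2 (by tauto)⟩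
    · exact ⟨v2, (pvEnds_mem _ _).2 (by rw [g1]; tauto), (pvEnds_mem f _).2 (by tauto)⟩

-- the key characterisation: A's loop equals "no edge touches vs" && B's pairwise loop
theorem pvLoop_eq (rest : List (List Int)) :
    ∀ vs : List Int, (∀ e ∈ rest, 2 ≤ e.length) →
    same_verticesLoop rest vs
      = ((rest.all fun e => !(vs.contains (PySem.List.pyGetD e 0 0)
                              || vs.contains (PySem.List.pyGetD e 1 0)))
         && same_verticesAltLoop (rest.map pvEnds)) := by
  induction rest with
  | nil => intro vs _; simp [same_verticesLoop, same_verticesAltLoop]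
  | cons e rest ih =>
    intro vs hpre
    have he : 2 ≤ e.length := hpre e (by simp)
    have hrest : ∀ f ∈ rest, 2 ≤ f.length := fun f hf => hpre f (by simp [hf])
    obtain ⟨v1, v2, tl, rfl⟩ : ∃ v1 v2 tl, e = v1 :: v2 :: tl := by
      match e, he with
      | v1 :: v2 :: tl, _ => exact ⟨v1, v2, tl, rfl⟩
    have hnn : (0 : Int) ≤ (tl.length : Int) + 1 := by positivity
    have g0 : PySem.List.pyGetD (v1 :: v2 :: tl) (0 : Int) 0 = v1 := by
      simp [PySem.List.pyGetD, PySem.List.pyGet?, PySem.List.pyIdx?, hnn]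
    have g1 : PySem.List.pyGetD (v1 :: v2 :: tl) (1 : Int) 0 = v2 := by
      simp [PySem.List.pyGetD, PySem.List.pyGet?, PySem.List.pyIdx?]
    have p0 : PySem.List.pyGet? (v1 :: v2 :: tl) (0 : Int) = some v1 := by
      simp [PySem.List.pyGet?, PySem.List.pyIdx?, hnn]
    have p1 : PySem.List.pyGet? (v1 :: v2 :: tl) (1 : Int) = some v2 := by
      simp [PySem.List.pyGet?, PySem.List.pyIdx?]
    simp only [same_verticesLoop, p0, p1]
    by_cases hc : (vs.contains v1 || vs.contains v2) = true
    · rw [if_pos hc]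
      simp only [List.all_cons, g0, g1, hc, Bool.not_true, Bool.false_and]
    · rw [if_neg hc, ih (vs ++ [v1, v2]) hrest]
      rw [Bool.eq_iff_iff]
      simp only [Bool.or_eq_true, not_or, List.contains_eq_mem, decide_eq_true_eq] at hc
      simp only [List.map_cons, same_verticesAltLoop, List.all_cons, g0, g1,
        Bool.and_eq_true, List.all_eq_true, Bool.not_eq_true', Bool.or_eq_false_iff,
        List.contains_eq_mem, decide_eq_false_iff_not, List.mem_append, List.mem_cons,
        List.not_mem_nil, or_false, not_or, ite_eq_iff, List.any_eq_true, List.mem_map,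
        exists_exists_and_eq_and, pvInter_ne_iff v1 v2 tl _ g0 g1,
        Bool.false_eq_true, and_false, false_or]
      constructor
      · rintro ⟨hP, hL⟩
        refine ⟨⟨hc, fun x hx => ⟨(hP x hx).1.1, (hP x hx).2.1⟩⟩, ?_, hL⟩
        rintro ⟨a, ha, hor⟩
        have := hP a ha
        tauto
      · rintro ⟨⟨_, hQ⟩, hnE, hL⟩
        refine ⟨fun x hx => ?_, hL⟩
        have h1 := (hQ x hx).1
        have h2 := (hQ x hx).2
        have hno : ¬(PySem.List.pyGetD x 0 0 = v1 ∨ PySem.List.pyGetD x 0 0 = v2 ∨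
            PySem.List.pyGetD x 1 0 = v1 ∨ PySem.List.pyGetD x 1 0 = v2) :=
          fun h => hnE ⟨x, hx, h⟩
        tauto

-- ===== VERDICT (by name: the statement is the Claim_ definition above) =====
theorem same_vertices_spec : Claim_equal_same_vertices := by
  intro edges _ hpre
  unfold Spec_same_vertices same_vertices same_vertices_alt
  rw [pvLoop_eq edges [] hpre]
  have hall : (edges.all fun e => !((List.contains [] (PySem.List.pyGetD e 0 0))
      || (List.contains [] (PySem.List.pyGetD e 1 0)))) = true := by simp
  rw [hall, Bool.true_and]
  rfl
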